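-- pv_equiv track=rewrite | github.com/bambinos/bambi | docs/pre_render.py | convert_anchor_headings
-- ===== SOURCE A (Python) =====
-- def starts_with_anchor(line: str) -> bool:
--     return line.lstrip().startswith('<a id="') and line.rstrip().endswith('"></a>')
--
-- def starts_with_heading(line: str) -> bool:
--     return line.lstrip().startswith("# ")
--
-- def extract_id(anchor_line: str) -> str:
--     return anchor_line.strip().split('id="', 1)[1].split('"', 1)[0]
--
-- def convert_anchor_headings(text: str) -> str:
--     lines = text.splitlines(keepends=True)
--     out = []
--     i = 0
--     while i < len(lines):
--         line = lines[i]
--         if i + 1 < len(lines) and starts_with_anchor(line) and starts_with_heading(lines[i + 1]):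
--             anchor_id = extract_id(line)
--             heading = lines[i + 1].rstrip("\n")
--             out.append(f"{heading} {{{'#' + anchor_id}}}\n")
--             i += 2
--             continue
--         out.append(line)
--         i += 1
--     return "".join(out)
-- ===== SOURCE B (Python) =====
-- def starts_with_anchor(line: str) -> bool:
--     return line.lstrip().startswith('<a id="') and line.rstrip().endswith('"></a>')
--
-- def starts_with_heading(line: str) -> bool:
--     return line.lstrip().startswith("# ")
--
-- def extract_id(anchor_line: str) -> str:
--     return anchor_line.strip().split('id="', 1)[1].split('"', 1)[0]
--
-- def _take_line(s: str):
--     # split off the first line (keeping its terminator), like splitlines(keepends=True)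
--     i, n = 0, len(s)
--     while i < n and s[i] != '\n' and s[i] != '\r':
--         i += 1
--     if i >= n:
--         return s, ''
--     if s[i] == '\r' and i + 1 < n and s[i + 1] == '\n':
--         return s[:i + 2], s[i + 2:]
--     return s[:i + 1], s[i + 1:]
--
-- def _split_keep(text: str):
--     lines = []
--     rest = text
--     while rest:
--         line, rest = _take_line(rest)
--         lines.append(line)
--     return lines
--
-- def convert_anchor_headings(text: str) -> str:
--     # Stateless local classification: anchor lines and heading lines are mutually
--     # exclusive (an lstripped line cannot start with both '<a id="' and '# '), so
--     # merges can never chain; whether a line survives is decided purely by its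
--     # two neighbours: an anchor followed by a heading becomes the merged heading,
--     # a heading preceded by an anchor disappears, everything else is kept as is.
--     lines = _split_keep(text)
--     n = len(lines)
--     pieces = []
--     prev = None
--     for i, cur in enumerate(lines):
--         nxt = lines[i + 1] if i + 1 < n else None
--         if nxt is not None and starts_with_anchor(cur) and starts_with_heading(nxt):
--             h = nxt.rstrip("\n")
--             pieces.append(f'{h} {{#{extract_id(cur)}}}\n')
--         elif prev is not None and starts_with_anchor(prev) and starts_with_heading(cur):
--             pass  # this heading was merged into the previous anchor line
--         else:
--             pieces.append(cur)
--         prev = cur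
--     return "".join(pieces)
-- ===== Notes on version B (the rewrite author's own statement) =====
-- stated objective: alternative
-- what changed: Replaced A's stateful index loop that looks ahead and skips two lines on a merge with a stateless per-line classification (each line is kept, merged, or dropped based only on its two neighbours), justified by the observation that the anchor and heading predicates are mutually exclusive so merges never chain; B also splits lines itself instead of splitlines(keepends=True).
import Mathlib
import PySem

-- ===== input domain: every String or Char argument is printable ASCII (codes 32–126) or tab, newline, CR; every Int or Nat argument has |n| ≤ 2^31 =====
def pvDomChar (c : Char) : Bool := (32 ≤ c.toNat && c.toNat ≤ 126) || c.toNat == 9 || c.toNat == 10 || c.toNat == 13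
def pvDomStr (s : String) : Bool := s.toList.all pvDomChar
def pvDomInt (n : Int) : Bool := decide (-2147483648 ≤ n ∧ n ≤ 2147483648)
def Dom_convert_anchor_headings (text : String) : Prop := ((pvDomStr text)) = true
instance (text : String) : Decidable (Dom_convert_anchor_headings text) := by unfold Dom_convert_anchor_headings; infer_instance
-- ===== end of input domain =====

-- B replaces A's stateful skip-ahead index loop with a stateless per-line neighbour classification (and its own line splitter); alternative decomposition, same cost.


-- shared module helpers (identical helper functions in both Pythons)

-- starts_with_anchor
def pvStartsAnchor (line : List Char) : Bool :=
  PySem.Chars.startswith (PySem.Chars.lstrip line) "<a id=\"".toList &&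
  PySem.Chars.endswith (PySem.Chars.rstrip line) "\"></a>".toList

-- starts_with_heading
def pvStartsHeading (line : List Char) : Bool :=
  PySem.Chars.startswith (PySem.Chars.lstrip line) "# ".toList

-- extract_id; the [1] index is via getD: both programs only call extract_id on lines
-- satisfying starts_with_anchor, where the split has a second part (Python never raises there)
def pvExtractId (anchorLine : List Char) : List Char :=
  ((PySem.Chars.splitOnMax (PySem.Chars.strip anchorLine) "id=\"".toList 1).getD 1 []
    |> (PySem.Chars.splitOnMax · "\"".toList 1)).headD []

-- ===== PORT A =====

-- text.splitlines(keepends=True), hand-ported: exact on the Dom alphabet, where the only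
-- line breaks are '\n', '\r' and '\r\n' (Python's extra break characters lie outside Dom)
def pvSplitKeepAux : List Char → List Char → List (List Char)
  | acc, [] => if acc.isEmpty then [] else [acc.reverse]
  | acc, '\n' :: rest => (acc.reverse ++ ['\n']) :: pvSplitKeepAux [] rest
  | acc, '\r' :: '\n' :: rest => (acc.reverse ++ ['\r', '\n']) :: pvSplitKeepAux [] rest
  | acc, '\r' :: rest => (acc.reverse ++ ['\r']) :: pvSplitKeepAux [] rest
  | acc, c :: rest => pvSplitKeepAux (c :: acc) rest

def pvSplitKeep (cs : List Char) : List (List Char) := pvSplitKeepAux [] cs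

-- line.rstrip("\n") (right-strip only '\n' characters)
def pvRstripNl (cs : List Char) : List Char := (cs.reverse.dropWhile (· == '\n')).reverse

-- f"{heading} {{{'#' + anchor_id}}}\n"
def pvMerged (anchorLine headingLine : List Char) : List Char :=
  pvRstripNl headingLine ++ (' ' :: '{' :: '#' :: (pvExtractId anchorLine ++ ['}', '\n']))

-- A's while loop over the line list with lookahead at i+1 (skip 2 on merge)
def pvLoopA : List (List Char) → List (List Char)
  | [] => []
  | [l] => [l]
  | l1 :: l2 :: rest =>
    if pvStartsAnchor l1 && pvStartsHeading l2 then
      pvMerged l1 l2 :: pvLoopA rest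
    else
      l1 :: pvLoopA (l2 :: rest)

def convert_anchor_headings (text : String) : String :=
  String.ofList (PySem.Chars.join [] (pvLoopA (pvSplitKeep text.toList)))

-- ===== PORT B =====

-- B's _take_line: scan to the first break character, keep it (two for "\r\n") with the prefix
def pvTakeLine : List Char → List Char × List Char
  | [] => ([], [])
  | c :: rest =>
    if c = '\n' then (['\n'], rest)
    else if c = '\r' then
      if rest.head? = some '\n' then (['\r', '\n'], rest.tail)
      else (['\r'], rest)
    else
      let p := pvTakeLine rest
      (c :: p.1, p.2)

theorem pvTakeLine_snd_length_lt : ∀ (cs : List Char), cs ≠ [] → (pvTakeLine cs).2.length < cs.length := by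
  intro cs h
  induction cs with
  | nil => exact absurd rfl h
  | cons c rest ih =>
    simp only [pvTakeLine]
    split_ifs with h1 h2 h3
    · simp
    · simp only [List.length_cons, List.length_tail]; omega
    · simp
    · cases rest with
      | nil => simp [pvTakeLine]
      | cons d r =>
        have := ih (by simp)
        simp only [List.length_cons] at this ⊢
        omega

-- B's _split_keep: peel one line at a time
def pvSplitB : List Char → List (List Char)
  | [] => []
  | c :: cs =>
    (pvTakeLine (c :: cs)).1 :: pvSplitB (pvTakeLine (c :: cs)).2
termination_by l => l.length
decreasing_by exact pvTakeLine_snd_length_lt _ (by simp)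

-- the pair test "nxt is not None and starts_with_anchor(cur) and starts_with_heading(nxt)"
def pvPairB (cur : List Char) : Option (List Char) → Bool
  | some nxt => pvStartsAnchor cur && pvStartsHeading nxt
  | none => false

-- the drop test "prev is not None and starts_with_anchor(prev) and starts_with_heading(cur)"
def pvDropB (cur : List Char) : Option (List Char) → Bool
  | some prev => pvStartsAnchor prev && pvStartsHeading cur
  | none => false

-- the merged piece built in B's first branch
def pvMergeB (cur nxt : List Char) : List Char :=
  (nxt.reverse.dropWhile (· == '\n')).reverse ++ " {#".toList ++ pvExtractId cur ++ "}\n".toList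

-- B's enumerate loop: each line is merged, dropped, or kept, from its two neighbours only
def pvScanB (prev : Option (List Char)) : List (List Char) → List (List Char)
  | [] => []
  | cur :: rest =>
    if pvPairB cur rest.head? then
      pvMergeB cur (rest.headD []) :: pvScanB (some cur) rest
    else if pvDropB cur prev then
      pvScanB (some cur) rest
    else
      cur :: pvScanB (some cur) rest

def convert_anchor_headings_alt (text : String) : String :=
  String.ofList (pvScanB none (pvSplitB text.toList)).flatten

-- ===== PRECONDITION & SPEC =====
def Spec_convert_anchor_headings (text : String) (out : String) : Prop := out = convert_anchor_headings_alt text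
instance (text : String) (out : String) : Decidable (Spec_convert_anchor_headings text out) := by unfold Spec_convert_anchor_headings; infer_instance

-- ===== CLAIM (what is proved, stated in full; the proofs are below) =====
def Claim_equal_convert_anchor_headings : Prop := ∀ (text : String), Dom_convert_anchor_headings text → Spec_convert_anchor_headings text (convert_anchor_headings text)

-- ===== LEMMAS AND PROOFS =====

theorem pvJoinNil_eq_flatten (xs : List (List Char)) : PySem.Chars.join [] xs = xs.flatten := by
  induction xs with
  | nil => rfl
  | cons a t ih =>
    cases t with
    | nil => simp [PySem.Chars.join_singleton]
    | cons b u => rw [PySem.Chars.join_cons_cons]; simp [ih]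

theorem pvMergeB_eq (a h : List Char) : pvMergeB a h = pvMerged a h := by
  have e1 : (" {#".toList : List Char) = [' ', '{', '#'] := rfl
  have e2 : ("}\n".toList : List Char) = ['}', '\n'] := rfl
  simp [pvMergeB, pvMerged, pvRstripNl, e1, e2]

-- the two line predicates are mutually exclusive (an lstripped line cannot start with both)
theorem pvHeading_not_anchor (l : List Char) (h : pvStartsHeading l = true) :
    pvStartsAnchor l = false := by
  rcases (PySem.Chars.startswith_iff _ _).mp h with ⟨t, ht⟩
  have e : ("# ".toList : List Char) = ['#', ' '] := rfl
  rw [e] at ht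
  unfold pvStartsAnchor
  cases hx : PySem.Chars.startswith (PySem.Chars.lstrip l) "<a id=\"".toList with
  | false => simp
  | true =>
    exfalso
    rcases (PySem.Chars.startswith_iff _ _).mp hx with ⟨t', ht'⟩
    have e2 : ("<a id=\"".toList : List Char) = ['<', 'a', ' ', 'i', 'd', '=', '"'] := rfl
    rw [e2, ← ht] at ht'
    simp at ht'

-- the accumulator bridge between A's splitter and B's splitter
def pvGlue (p : List Char) : List (List Char) → List (List Char)
  | [] => if p.isEmpty then [] else [p]
  | l :: t => (p ++ l) :: t

theorem pvGlue_nil (ls : List (List Char)) : pvGlue [] ls = ls := by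
  cases ls <;> simp [pvGlue]

theorem pvGlue_snoc (p : List Char) (c : Char) (rest : List Char) :
    pvGlue (p ++ [c]) (pvSplitB rest) =
      (p ++ c :: (pvTakeLine rest).1) :: pvSplitB (pvTakeLine rest).2 := by
  cases rest with
  | nil => simp [pvSplitB, pvTakeLine, pvGlue]
  | cons r rs => simp [pvSplitB, pvGlue]

theorem pvAux_eq_glue : ∀ (acc cs : List Char),
    pvSplitKeepAux acc cs = pvGlue acc.reverse (pvSplitB cs) := by
  intro acc cs
  induction acc, cs using pvSplitKeepAux.induct with
  | case1 acc hacc =>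
    have : acc = [] := List.isEmpty_iff.mp hacc
    subst this
    simp [pvSplitKeepAux, pvSplitB, pvGlue]
  | case2 acc hacc =>
    have hne : acc ≠ [] := by simpa [List.isEmpty_iff] using hacc
    simp [pvSplitKeepAux, pvSplitB, pvGlue, hacc]
  | case3 acc rest ih =>
    rw [pvSplitKeepAux, ih, List.reverse_nil, pvGlue_nil]
    have : pvSplitB ('\n' :: rest) = ['\n'] :: pvSplitB rest := by
      simp [pvSplitB, pvTakeLine]
    rw [this, pvGlue]
  | case4 acc rest ih =>
    rw [pvSplitKeepAux, ih, List.reverse_nil, pvGlue_nil]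
    have : pvSplitB ('\r' :: '\n' :: rest) = ['\r', '\n'] :: pvSplitB rest := by
      simp [pvSplitB, pvTakeLine]
    rw [this, pvGlue]
  | case5 acc rest hne ih =>
    rw [pvSplitKeepAux.eq_4 acc rest hne, ih, List.reverse_nil, pvGlue_nil]
    have : pvSplitB ('\r' :: rest) = ['\r'] :: pvSplitB rest := by
      cases rest with
      | nil => simp [pvSplitB, pvTakeLine]
      | cons x xs =>
        have hx : x ≠ '\n' := fun hx => hne xs (by rw [hx])
        simp [pvSplitB, pvTakeLine, hx]
    rw [this, pvGlue]
  | case6 acc c rest h1 h2 h3 ih =>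
    have hc1 : c ≠ '\n' := fun h => h1 h
    have hc3 : c ≠ '\r' := fun h => h3 h
    rw [pvSplitKeepAux.eq_5 acc c rest h1 h2 h3, ih]
    have htl : pvTakeLine (c :: rest) = (c :: (pvTakeLine rest).1, (pvTakeLine rest).2) := by
      simp [pvTakeLine, hc1, hc3]
    have hsp : pvSplitB (c :: rest) = (c :: (pvTakeLine rest).1) :: pvSplitB (pvTakeLine rest).2 := by
      rw [pvSplitB, htl]
    rw [hsp]
    simp only [List.reverse_cons]
    rw [pvGlue_snoc]
    rfl

theorem pvSplitB_eq (cs : List Char) : pvSplitB cs = pvSplitKeep cs := by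
  rw [pvSplitKeep, pvAux_eq_glue, List.reverse_nil, pvGlue_nil]

theorem pvScanB_eq_loopA : ∀ (lines : List (List Char)),
    ∀ (prev : Option (List Char)),
      (∀ p h, prev = some p → lines.head? = some h →
        (pvStartsAnchor p && pvStartsHeading h) = false) →
      pvScanB prev lines = pvLoopA lines := by
  intro lines
  induction lines using pvLoopA.induct with
  | case1 => intro prev _; rfl
  | case2 l =>
    intro prev hp
    have hdrop : pvDropB l prev = false := by
      cases prev with
      | none => rfl
      | some p => simpa [pvDropB] using hp p l rfl rfl
    rw [pvScanB, if_neg (by simp [pvPairB]), if_neg (by simp [hdrop]), pvScanB, pvLoopA]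
  | case3 l1 l2 rest hcond ih =>
    intro prev hp
    have ha : pvStartsAnchor l1 = true := (Bool.and_eq_true_iff.mp hcond).1
    have hh : pvStartsHeading l2 = true := (Bool.and_eq_true_iff.mp hcond).2
    have hna : pvStartsAnchor l2 = false := pvHeading_not_anchor l2 hh
    have hpair2 : pvPairB l2 rest.head? = false := by
      cases rest.head? <;> simp [pvPairB, hna]
    have hdrop2 : pvDropB l2 (some l1) = true := by simp [pvDropB, ha, hh]
    have hpair1 : pvPairB l1 (l2 :: rest).head? = true := by
      simp [pvPairB, hcond]
    rw [pvLoopA, if_pos hcond, pvScanB, if_pos hpair1, pvMergeB_eq]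
    simp only [List.headD_cons]
    congr 1
    rw [pvScanB, if_neg (by simp [hpair2]), if_pos hdrop2]
    exact ih (some l2) (by intro p h hp1 hh1; cases hp1; simp [hna])
  | case4 l1 l2 rest hcond ih =>
    intro prev hp
    have hc : (pvStartsAnchor l1 && pvStartsHeading l2) = false := by
      revert hcond; cases (pvStartsAnchor l1 && pvStartsHeading l2) <;> simp
    have hdrop : pvDropB l1 prev = false := by
      cases prev with
      | none => rfl
      | some p => simpa [pvDropB] using hp p l1 rfl rfl
    rw [pvLoopA, if_neg hcond, pvScanB, if_neg (by simp [pvPairB, hc]),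
      if_neg (by simp [hdrop])]
    congr 1
    exact ih (some l1) (by
      intro p h hp1 hh1
      cases hp1
      simp only [List.head?_cons, Option.some.injEq] at hh1
      cases hh1
      exact hc)

-- ===== VERDICT (by name: the statement is the Claim_ definition above) =====
theorem convert_anchor_headings_spec : Claim_equal_convert_anchor_headings := by
  intro text _
  show convert_anchor_headings text = convert_anchor_headings_alt text
  rw [convert_anchor_headings, convert_anchor_headings_alt, pvSplitB_eq,
    pvScanB_eq_loopA _ none (by intro p h hp1 _; cases hp1),
    pvJoinNil_eq_flatten]
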